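-- pv_equiv track=rewrite | github.com/ZckFreedom/Mathworks | db_sqence/Feedback_shift_register.py | mul_items
-- ===== SOURCE A (Python) =====
-- from itertools import combinations
--
-- def coefficient(list1, list2):      #计算l2中对应于列表l1中为0的位置的成绩，为该项的系数
-- 	the_coefficient = 1
-- 	for i in range(len(list1)):
-- 		if list1[i] == 0:
-- 			the_coefficient *= list2[i]
-- 	return the_coefficient
--
-- def single_items(n, k):       #给出n和k，得到所有n长且有k位是1的状态
-- 	all_list = []
-- 	n_group = []
-- 	for i in range(n):
-- 		n_group.append(i)
-- 	all_comb = list(combinations(n_group, k))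
-- 	j = 0
-- 	while j < len(all_comb):
-- 		base_list = [0] * n
-- 		for i in range(k):
-- 			base_list[all_comb[j][i]] = 1
-- 		all_list.append(base_list.copy())
-- 		base_list.clear()
-- 		j += 1
-- 	return all_list
--
-- def mul_items(list_c):      #给一个n长序列，得到(x1+c1+1)(x2+c2+1)...(xn+cn+1)的所有项
-- 	order = len(list_c)
-- 	c_list = [0] * order
-- 	mul_list = []
-- 	for i in range(order):
-- 		c_list[i] = 1 - list_c[i]
-- 	j = order
-- 	while j > 0:
-- 		all_k = single_items(order, j)
-- 		for i in range(len(all_k)):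
-- 			if coefficient(all_k[i], c_list) == 0:
-- 				continue
-- 			mul_list.append(all_k[i])
-- 		j -= 1
-- 	return mul_list
-- ===== SOURCE B (Python) =====
-- def mul_items(list_c):
--     # Enumerate only vectors whose zero positions never hit a coefficient-killing
--     # c==1 entry: recurse over list_c, forcing a 1 wherever list_c[i] == 1,
--     # then emit the generated vectors bucketed by weight, heaviest first.
--     def gen(cs):
--         if not cs:
--             return [([], 0)]
--         rest = gen(cs[1:])
--         res = [([1] + v, w + 1) for (v, w) in rest]
--         if cs[0] != 1:
--             res += [([0] + v, w) for (v, w) in rest]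
--         return res
--     pairs = gen(list_c)
--     out = []
--     for k in range(len(list_c), 0, -1):
--         out.extend(v for (v, w) in pairs if w == k)
--     return out
-- ===== Notes on version B (the rewrite author's own statement) =====
-- stated objective: faster
-- what changed: A builds every weight-k 0/1 vector for all k via itertools.combinations and filters out those whose coefficient product vanishes; B does one recursive pass over list_c that branches 0/1 only at positions with list_c[i] != 1 (forcing a 1 wherever list_c[i] == 1) and then emits the generated vectors bucketed by weight, heaviest first.
import Mathlib
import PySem

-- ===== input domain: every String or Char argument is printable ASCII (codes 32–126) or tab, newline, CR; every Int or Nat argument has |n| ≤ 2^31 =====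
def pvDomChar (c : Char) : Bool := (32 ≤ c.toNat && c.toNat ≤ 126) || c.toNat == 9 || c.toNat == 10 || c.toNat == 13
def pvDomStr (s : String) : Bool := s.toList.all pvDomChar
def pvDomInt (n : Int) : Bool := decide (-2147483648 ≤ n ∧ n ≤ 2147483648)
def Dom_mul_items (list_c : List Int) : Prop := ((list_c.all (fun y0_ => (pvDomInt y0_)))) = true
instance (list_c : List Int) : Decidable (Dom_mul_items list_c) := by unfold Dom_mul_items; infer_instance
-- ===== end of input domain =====

-- ===== PORT A =====
-- B replaces A's enumerate-all-weight-k-vectors-then-filter with one recursive pass over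
-- list_c that only generates vectors whose forced (list_c[i] == 1) positions carry a 1.

-- for i in range(len(list1)): if list1[i] == 0: the_coefficient *= list2[i]
-- (only called with len(list2) = len(list1), so pyGetD's default is never read)
def coefficient (list1 list2 : List Int) : Int :=
  (PySem.List.pyRange 0 (PySem.List.len list1) 1).foldl
    (fun acc i => if PySem.List.pyGetD list1 i 0 = 0 then acc * PySem.List.pyGetD list2 i 0 else acc) 1

-- n_group = list(range(n)); all_comb = list(combinations(n_group, k)); each base_list built by setting ones
def single_items (n k : Int) : List (List Int) :=
  let n_group := PySem.List.pyRange 0 n 1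
  let all_comb := PySem.List.combinations n_group k.toNat
  all_comb.foldl
    (fun all_list comb =>
      all_list ++ [(PySem.List.pyRange 0 (PySem.List.len comb) 1).foldl
        (fun base_list i => PySem.List.pySetD base_list (PySem.List.pyGetD comb i 0) 1)
        (List.replicate n.toNat 0)])
    []

def mul_items (list_c : List Int) : List (List Int) :=
  let order := PySem.List.len list_c
  let c_list := (PySem.List.pyRange 0 order 1).foldl
    (fun cl i => PySem.List.pySetD cl i (1 - PySem.List.pyGetD list_c i 0))
    (List.replicate order.toNat 0)
  (PySem.List.pyRange order 0 (-1)).foldl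
    (fun mul_list j =>
      let all_k := single_items order j
      (PySem.List.pyRange 0 (PySem.List.len all_k) 1).foldl
        (fun ml i =>
          if coefficient (PySem.List.pyGetD all_k i []) c_list = 0 then ml
          else ml ++ [PySem.List.pyGetD all_k i []])
        mul_list)
    []

-- ===== PORT B =====
-- gen(cs): DFS over cs, 1-branch first, 0-branch only when cs[0] != 1; returns (vector, weight) pairs
def genAlt : List Int → List (List Int × Nat)
  | [] => [([], 0)]
  | c :: rest =>
    let g := genAlt rest
    g.map (fun p => (1 :: p.1, p.2 + 1)) ++
      (if c ≠ 1 then g.map (fun p => (0 :: p.1, p.2)) else [])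

-- for k in range(len(list_c), 0, -1): out.extend(v for (v, w) in pairs if w == k)
def mul_items_alt (list_c : List Int) : List (List Int) :=
  let pairs := genAlt list_c
  (PySem.List.pyRange (PySem.List.len list_c) 0 (-1)).flatMap
    (fun k => ((pairs.filter (fun p => (p.2 : Int) == k)).map (·.1)))

-- ===== PRECONDITION & SPEC =====
def Spec_mul_items (list_c : List Int) (out : List (List Int)) : Prop := out = mul_items_alt list_c
instance (list_c : List Int) (out : List (List Int)) : Decidable (Spec_mul_items list_c out) := by unfold Spec_mul_items; infer_instance

-- ===== CLAIM (what is proved, stated in full; the proofs are below) =====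
def Claim_equal_mul_items : Prop := ∀ (list_c : List Int), Dom_mul_items list_c → Spec_mul_items list_c (mul_items list_c)

-- ===== LEMMAS AND PROOFS =====

-- the per-position coefficient product, structurally
def prodCoef : List Int → List Int → Int
  | a :: l1, b :: l2 => (if a = 0 then b else 1) * prodCoef l1 l2
  | _, _ => 1

-- the canonical weight-k 0/1 vectors of length n, in A's (combination-lexicographic) order,
-- and the indicator vector of a combination of Nat positions
def vecs : Nat → Nat → List (List Int)
  | 0, 0 => [[]]
  | 0, _+1 => []
  | n+1, 0 => (vecs n 0).map (0 :: ·)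
  | n+1, k+1 => (vecs n k).map (1 :: ·) ++ (vecs n (k+1)).map (0 :: ·)
def indic (n : Nat) (c : List Nat) : List Int :=
  c.foldl (fun base j => base.set j 1) (List.replicate n 0)

lemma coeff_fold (l1 l2 : List Int) (h : l1.length = l2.length) (init : Int) :
    (List.range l1.length).foldl
      (fun acc k => if l1.getD k 0 = 0 then acc * l2.getD k 0 else acc) init
      = init * prodCoef l1 l2 := by
  induction l1 generalizing l2 init with
  | nil => simp [prodCoef]
  | cons a l1 ih =>
    cases l2 with
    | nil => simp at h
    | cons b l2 =>
      simp only [List.length_cons, List.range_succ_eq_map, List.foldl_cons, List.foldl_map]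
      simp only [List.getD_cons_zero, List.getD_cons_succ, Nat.succ_eq_add_one]
      rw [ih l2 (by simpa using h)]
      simp only [prodCoef]
      split_ifs <;> ring

lemma coeff_eq (l1 l2 : List Int) (h : l1.length = l2.length) :
    coefficient l1 l2 = prodCoef l1 l2 := by
  unfold coefficient
  rw [PySem.List.len_eq, PySem.List.pyRange_zero_nat, List.foldl_map]
  simpa using coeff_fold l1 l2 h 1

lemma shift_fold (c : List Nat) (x : Int) (v : List Int) :
    (c.map (· + 1)).foldl (fun b j => b.set j 1) (x :: v)
      = x :: c.foldl (fun b j => b.set j 1) v := by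
  induction c generalizing v with
  | nil => simp
  | cons j c ih => simp [List.set_cons_succ, ih]
lemma indic_combs (n k : Nat) :
    (PySem.List.combinations (List.range n) k).map (indic n) = vecs n k := by
  induction n generalizing k with
  | zero =>
    cases k with
    | zero => simp [PySem.List.combinations_zero, indic, vecs]
    | succ k => simp [PySem.List.combinations_nil_succ, vecs]
  | succ n ih =>
    have hrange : List.range (n+1) = 0 :: (List.range n).map (· + 1) := by
      simpa [Nat.succ_eq_add_one] using (List.range_succ_eq_map (n := n))
    have hind1 : ∀ c : List Nat, indic (n+1) (0 :: c.map (· + 1)) = 1 :: indic n c := by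
      intro c
      simp only [indic, List.foldl_cons, List.replicate_succ, List.set_cons_zero]
      exact shift_fold c 1 (List.replicate n 0)
    have hind0 : ∀ c : List Nat, indic (n+1) (c.map (· + 1)) = 0 :: indic n c := by
      intro c
      simp only [indic, List.replicate_succ]
      exact shift_fold c 0 (List.replicate n 0)
    cases k with
    | zero =>
      rw [hrange]
      simp only [PySem.List.combinations_zero, vecs, ← ih 0]
      simp [indic, List.replicate_succ]
    | succ k =>
      rw [hrange, PySem.List.combinations_cons_succ, PySem.List.combinations_map,
        PySem.List.combinations_map]
      simp only [List.map_append, List.map_map, vecs, ← ih k, ← ih (k+1), List.map_map]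
      congr 1
      · apply List.map_congr_left; intro c _; exact hind1 c
      · apply List.map_congr_left; intro c _; exact hind0 c

lemma single_items_eq (n k : Nat) :
    single_items (n : Int) (k : Int) = vecs n k := by
  unfold single_items
  simp only [PySem.List.pyRange_zero_nat, Int.toNat_natCast, PySem.List.combinations_map]
  rw [PySem.List.foldl_append_singleton_eq_map]
  rw [← indic_combs n k, List.map_map]
  apply List.map_congr_left
  intro c _
  simp only [Function.comp_def]
  have h1 := PySem.List.foldl_pyRange_zero_pyGetD (c.map (fun j : Nat => (j : Int))) (0 : Int)
    (fun base v => PySem.List.pySetD base v 1) (List.replicate n (0 : Int))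
  simp only at h1
  rw [h1, List.foldl_map]
  simp [indic]

lemma shift_fold2 (x : Int) (xs : List Int) (l : List Nat) (y : Int) (v : List Int) :
    (l.map (· + 1)).foldl (fun b j => b.set j (1 - (x :: xs).getD j 0)) (y :: v)
      = y :: l.foldl (fun b j => b.set j (1 - xs.getD j 0)) v := by
  induction l generalizing v with
  | nil => simp
  | cons j l ih =>
    simp only [List.map_cons, List.foldl_cons, List.set_cons_succ, List.getD_cons_succ]
    exact ih _
lemma clist_gen (xs acc : List Int) (h : acc.length = xs.length) :
    (List.range xs.length).foldl (fun cl k => cl.set k (1 - xs.getD k 0)) acc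
      = xs.map (1 - ·) := by
  induction xs generalizing acc with
  | nil =>
    simp only [List.length_nil, List.range_zero, List.foldl_nil, List.map_nil]
    exact List.eq_nil_of_length_eq_zero h
  | cons x xs ih =>
    cases acc with
    | nil => simp at h
    | cons a acc =>
      simp only [List.length_cons, List.range_succ_eq_map, List.foldl_cons,
        List.getD_cons_zero, List.set_cons_zero]
      rw [show (List.range xs.length).map Nat.succ = (List.range xs.length).map (· + 1) from by simp,
        shift_fold2, ih acc (by simpa using h)]
      simp
lemma clist_build (xs : List Int) :
    (PySem.List.pyRange 0 (xs.length : Int) 1).foldl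
      (fun cl i => PySem.List.pySetD cl i (1 - PySem.List.pyGetD xs i 0))
      (List.replicate xs.length 0) = xs.map (1 - ·) := by
  rw [PySem.List.pyRange_zero_nat, List.foldl_map]
  simpa using clist_gen xs (List.replicate xs.length 0) (by simp)

lemma main_lemma (cs : List Int) (k : Nat) :
    (vecs cs.length k).filter (fun v => !(prodCoef v (cs.map (1 - ·)) == 0))
      = ((genAlt cs).filter (fun p => p.2 == k)).map (·.1) := by
  induction cs generalizing k with
  | nil =>
    cases k with
    | zero => simp [vecs, genAlt, prodCoef]
    | succ k => simp [vecs, genAlt, prodCoef]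
  | cons c cs ih =>
    cases k with
    | zero =>
      by_cases hc : c = 1
      · simp [vecs, genAlt, List.filter_map, Function.comp_def, prodCoef, hc]
      · have hc' : (1 : Int) - c ≠ 0 := sub_ne_zero_of_ne (Ne.symm hc)
        simp [vecs, genAlt, List.filter_map, List.filter_append, Function.comp_def,
          prodCoef, hc, List.map_map]
        rw [show (fun (x : List Int) => !((1 - c) * prodCoef x (cs.map (1 - ·)) == 0))
              = (fun x => !(prodCoef x (cs.map (1 - ·)) == 0)) from by
            funext x; simp [mul_eq_zero, hc'], ih 0]
        simp [List.map_map, Function.comp_def]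
    | succ k =>
      by_cases hc : c = 1
      · simp [vecs, genAlt, List.filter_map, List.filter_append, Function.comp_def, prodCoef,
          hc, List.map_map, ih k]
      · have hc' : (1 : Int) - c ≠ 0 := sub_ne_zero_of_ne (Ne.symm hc)
        simp [vecs, genAlt, List.filter_map, List.filter_append, Function.comp_def,
          prodCoef, hc, List.map_map]
        rw [show (fun (x : List Int) => !((1 - c) * prodCoef x (cs.map (1 - ·)) == 0))
              = (fun x => !(prodCoef x (cs.map (1 - ·)) == 0)) from by
            funext x; simp [mul_eq_zero, hc'], ih k, ih (k+1)]
        simp [List.map_map, Function.comp_def]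

lemma vecs_length (n : Nat) : ∀ (k : Nat) (v : List Int), v ∈ vecs n k → v.length = n := by
  induction n with
  | zero =>
    intro k v hv
    cases k with
    | zero => simp [vecs] at hv; simp [hv]
    | succ k => simp [vecs] at hv
  | succ n ih =>
    intro k v hv
    cases k with
    | zero =>
      simp only [vecs, List.mem_map] at hv
      obtain ⟨w, hw, rfl⟩ := hv
      simp [ih 0 w hw]
    | succ k =>
      simp only [vecs, List.mem_append, List.mem_map] at hv
      rcases hv with ⟨w, hw, rfl⟩ | ⟨w, hw, rfl⟩
      · simp [ih k w hw]
      · simp [ih (k+1) w hw]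

lemma mul_items_eq_alt (list_c : List Int) : mul_items list_c = mul_items_alt list_c := by
  unfold mul_items mul_items_alt
  simp only [PySem.List.len_eq, Int.toNat_natCast]
  rw [clist_build]
  -- inner index loop = filter
  have hinner : ∀ (all_k : List (List Int)) (acc : List (List Int)),
      (PySem.List.pyRange 0 (all_k.length : Int) 1).foldl
        (fun ml i =>
          if coefficient (PySem.List.pyGetD all_k i []) (list_c.map (1 - ·)) = 0 then ml
          else ml ++ [PySem.List.pyGetD all_k i []])
        acc
      = acc ++ all_k.filter (fun v => !(coefficient v (list_c.map (1 - ·)) == 0)) := by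
    intro all_k acc
    rw [← PySem.List.len_eq all_k]
    have h1 := PySem.List.foldl_pyRange_zero_pyGetD all_k ([] : List Int)
      (fun ml v => if coefficient v (list_c.map (1 - ·)) = 0 then ml else ml ++ [v]) acc
    simp only at h1
    rw [h1]
    rw [show (fun (ml : List (List Int)) (v : List Int) =>
          if coefficient v (list_c.map (1 - ·)) = 0 then ml else ml ++ [v])
        = (fun ml v => if (!(coefficient v (list_c.map (1 - ·)) == 0)) = true then ml ++ [id v] else ml) from by
        funext ml v; by_cases h : coefficient v (list_c.map (1 - ·)) = 0 <;> simp [h]]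
    rw [PySem.List.foldl_append_if]
    simp
  simp only [hinner]
  rw [PySem.List.foldl_append_eq_flatMap]
  simp only [List.nil_append, List.flatMap_def]
  apply congrArg List.flatten
  apply List.map_congr_left
  intro j hj
  rw [PySem.List.pyRange_neg_one] at hj
  simp only [List.mem_map, List.mem_range] at hj
  obtain ⟨i, hi, rfl⟩ := hj
  have hji : ((list_c.length : Int) - i) = ((list_c.length - i : Nat) : Int) := by
    omega
  rw [hji, single_items_eq]
  rw [List.filter_congr (fun v hv => by
    rw [coeff_eq v (list_c.map (1 - ·)) (by simp [vecs_length _ _ v hv])])]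
  rw [main_lemma]
  apply congrArg
  apply List.filter_congr
  intro p _
  simp

-- ===== VERDICT (by name: the statement is the Claim_ definition above) =====
theorem mul_items_spec : Claim_equal_mul_items := by
  intro list_c _
  unfold Spec_mul_items
  exact mul_items_eq_alt list_c
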